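-- pv_equiv track=rewrite | github.com/mitometh/300-problems | problem_5.py | solve
-- ===== SOURCE A (Python) =====
-- def solve(digits):
--     l = len(digits)
--     x = y = 0
--     result = []
--     while(x < l):
--         y = 0
--         while(y < l - 1):
--             tmp = digits[y + 1]
--             digits[y + 1] = digits[y]
--             digits[y] = tmp
--             result.append(digits.copy())
--             y += 1
--         x += 1
--
--     return result
-- ===== SOURCE B (Python) =====
-- def solve(digits):
--     l = len(digits)
--     s = list(digits)
--     result = []
--     for _ in range(l):
--         for y in range(l - 1):
--             result.append(s[1:y + 2] + [s[0]] + s[y + 2:])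
--         s = s[1:] + s[:1]
--     return result
-- ===== Notes on version B (the rewrite author's own statement) =====
-- stated objective: alternative
-- what changed: B builds each snapshot row directly by slicing a non-mutating rotated base list (s[1:y+2] + [s[0]] + s[y+2:], then rotate s), instead of A's cumulative in-place adjacent swaps on the argument; B also never mutates the caller's list (A's mutation nets out to the identity).
import Mathlib
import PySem

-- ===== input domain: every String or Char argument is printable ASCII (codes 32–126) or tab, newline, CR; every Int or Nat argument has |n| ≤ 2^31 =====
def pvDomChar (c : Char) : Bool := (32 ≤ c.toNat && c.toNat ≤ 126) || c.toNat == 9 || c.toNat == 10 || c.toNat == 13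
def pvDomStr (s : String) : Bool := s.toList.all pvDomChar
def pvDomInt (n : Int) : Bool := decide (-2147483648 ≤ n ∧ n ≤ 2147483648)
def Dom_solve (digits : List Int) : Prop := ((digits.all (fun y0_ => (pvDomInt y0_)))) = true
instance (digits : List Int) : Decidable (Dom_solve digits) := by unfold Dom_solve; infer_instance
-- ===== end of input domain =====

-- B replaces A's cumulative in-place adjacent swaps by per-row slice construction over a rotated
-- base (alternative decomposition, same cost); equivalence is about the return value — A mutates
-- its argument in place but restores it (l left-rotations = identity), B never mutates it.

-- ===== PORT A =====
-- inner while body: swap digits[y], digits[y+1] and append a copy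
def solveSwap (st : List Int × List (List Int)) (y : Nat) : List Int × List (List Int) :=
  let tmp := st.1.getD (y + 1) 0            -- index always in range in A (y+1 < l), so getD is exact
  let d := st.1.set (y + 1) (st.1.getD y 0)
  let d := d.set y tmp
  (d, st.2 ++ [d])

-- one iteration of the outer while loop
def solvePass (l : Nat) (st : List Int × List (List Int)) (_x : Nat) : List Int × List (List Int) :=
  (List.range (l - 1)).foldl solveSwap st

def solve (digits : List Int) : List (List Int) :=
  let l := digits.length
  ((List.range l).foldl (solvePass l) (digits, [])).2

-- ===== PORT B =====
-- row appended for index y: s[1:y+2] + [s[0]] + s[y+2:]  (s[0] in range whenever a row is built, so getD is exact)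
def solveRow (s : List Int) (y : Nat) : List Int :=
  PySem.List.slice s (some 1) (some ((y : Int) + 2)) ++ [s.getD 0 0] ++
    PySem.List.slice s (some ((y : Int) + 2)) none

-- one iteration of B's outer for loop: append all rows, then s = s[1:] + s[:1]
def solvePassAlt (l : Nat) (st : List Int × List (List Int)) (_x : Nat) : List Int × List (List Int) :=
  (PySem.List.slice st.1 (some 1) none ++ PySem.List.slice st.1 none (some 1),
   st.2 ++ (List.range (l - 1)).map (solveRow st.1))

def solve_alt (digits : List Int) : List (List Int) :=
  let l := digits.length
  ((List.range l).foldl (solvePassAlt l) (digits, [])).2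

-- ===== PRECONDITION & SPEC =====
def Spec_solve (digits : List Int) (out : List (List Int)) : Prop := out = solve_alt digits
instance (digits : List Int) (out : List (List Int)) : Decidable (Spec_solve digits out) := by unfold Spec_solve; infer_instance

-- ===== CLAIM (what is proved, stated in full; the proofs are below) =====
def Claim_equal_solve : Prop := ∀ (digits : List Int), Dom_solve digits → Spec_solve digits (solve digits)

-- ===== LEMMAS AND PROOFS =====

-- state of A's list after n swaps of a pass that started at a :: t
def pvPart (a : Int) (t : List Int) (n : Nat) : List Int := t.take n ++ [a] ++ t.drop n

-- one swap on a list P ++ a :: b :: R at positions |P|, |P|+1 exchanges a and b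
theorem pvSeg_step (P R : List Int) (a b : Int) :
    (((P ++ a :: b :: R).set (P.length + 1) ((P ++ a :: b :: R).getD P.length 0)).set
        P.length ((P ++ a :: b :: R).getD (P.length + 1) 0)) = P ++ b :: a :: R := by
  induction P with
  | nil => simp
  | cons p P ih =>
      simp

theorem pvSwap_part (a : Int) (t : List Int) (n : Nat) (hn : n < t.length) :
    solveSwap (pvPart a t n, r) n = (pvPart a t (n + 1), r ++ [pvPart a t (n + 1)]) := by
  have hdrop : t.drop n = t[n] :: t.drop (n + 1) := List.drop_eq_getElem_cons hn
  have hlen : (t.take n).length = n := List.length_take_of_le (Nat.le_of_lt hn)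
  have hform : pvPart a t n = t.take n ++ a :: t[n] :: t.drop (n + 1) := by
    unfold pvPart; rw [hdrop]; simp
  have hform' : pvPart a t (n + 1) = t.take n ++ t[n] :: a :: t.drop (n + 1) := by
    unfold pvPart
    rw [List.take_add_one, List.getElem?_eq_getElem hn]
    simp only [Option.toList_some, List.append_assoc, List.cons_append, List.nil_append]
  have := pvSeg_step (t.take n) (t.drop (n + 1)) a t[n]
  simp only [solveSwap, hform, hform', hlen] at *
  exact Prod.ext (by simpa using this) (by simp; simpa using this)

theorem pvInner (a : Int) (t : List Int) (r : List (List Int)) :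
    ∀ n, n ≤ t.length →
      (List.range n).foldl solveSwap (a :: t, r) =
        (pvPart a t n, r ++ (List.range n).map (fun y => pvPart a t (y + 1))) := by
  intro n
  induction n with
  | zero => intro _; simp [pvPart]
  | succ n ih =>
      intro h
      have hn : n < t.length := h
      rw [List.range_succ, List.foldl_append, ih (Nat.le_of_lt hn)]
      simp [pvSwap_part a t n hn]

-- B's row equals A's snapshot, on a nonempty base
theorem pvRow_eq (a : Int) (t : List Int) (y : Nat) :
    solveRow (a :: t) y = pvPart a t (y + 1) := by
  have h2 : ((y : Int) + 2) = ((y + 2 : Nat) : Int) := by push_cast; ring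
  have h1 : (1 : Int) = ((1 : Nat) : Int) := rfl
  simp only [solveRow, h2, h1, PySem.List.slice_natCast, PySem.List.slice_from_natCast]
  simp [pvPart, List.drop_succ_cons, show y + 2 - 1 = y + 1 by omega]

-- one full pass agrees between the two ports and rotates the state left by one
theorem pvPass_eq (l : Nat) (s : List Int) (r : List (List Int)) (hs : s.length = l) (x : Nat) :
    solvePass l (s, r) x = solvePassAlt l (s, r) x := by
  cases s with
  | nil =>
      have : l = 0 := by simpa using hs.symm
      simp [solvePass, solvePassAlt, this, PySem.List.slice]
  | cons a t =>
      have hl : l - 1 = t.length := by simp at hs; omega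
      have h1 : (1 : Int) = ((1 : Nat) : Int) := rfl
      rw [solvePass, hl, pvInner a t r t.length (le_refl _)]
      simp only [solvePassAlt, h1, PySem.List.slice_from_natCast, PySem.List.slice_to_natCast, hl]
      refine Prod.ext ?_ ?_
      · simp [pvPart]
      · simp
        intro y _; exact (pvRow_eq a t y).symm

theorem pvOuter (l : Nat) :
    ∀ (m : Nat) (s : List Int) (r : List (List Int)), s.length = l →
      (List.range m).foldl (solvePass l) (s, r) = (List.range m).foldl (solvePassAlt l) (s, r) := by
  intro m
  induction m with
  | zero => intro s r _; rfl
  | succ m ih =>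
      intro s r hs
      rw [List.range_succ_eq_map]
      simp only [List.foldl_cons, List.foldl_map]
      have hfa : ∀ (st : List Int × List (List Int)) (y : Nat),
          solvePass l st (y + 1) = solvePass l st y := fun _ _ => rfl
      have hfb : ∀ (st : List Int × List (List Int)) (y : Nat),
          solvePassAlt l st (y + 1) = solvePassAlt l st y := fun _ _ => rfl
      rw [pvPass_eq l s r hs 0]
      have hlen : (solvePassAlt l (s, r) 0).1.length = l := by
        cases s with
        | nil => simpa using hs
        | cons a t =>
            simp only [solvePassAlt]
            rw [PySem.List.slice_from_one,
              show (some (1 : Int)) = some (((1 : Nat) : Int)) from rfl,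
              PySem.List.slice_to_natCast]
            simp at hs ⊢; omega
      calc (List.range m).foldl (fun st y => solvePass l st (y + 1)) (solvePassAlt l (s, r) 0)
          = (List.range m).foldl (solvePass l) (solvePassAlt l (s, r) 0) := by
            simp [hfa]
        _ = (List.range m).foldl (solvePassAlt l) (solvePassAlt l (s, r) 0) := by
            simpa using ih (solvePassAlt l (s, r) 0).1 (solvePassAlt l (s, r) 0).2 hlen
        _ = (List.range m).foldl (fun st y => solvePassAlt l st (y + 1)) (solvePassAlt l (s, r) 0) := by
            simp [hfb]

-- ===== VERDICT (by name: the statement is the Claim_ definition above) =====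
theorem solve_spec : Claim_equal_solve := by
  intro digits _
  unfold Spec_solve solve solve_alt
  exact congrArg Prod.snd (pvOuter digits.length digits.length digits [] rfl)
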